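-- pv_equiv track=rewrite | github.com/JunyuZhou2002/MarQSim | src/marqsim.py | get_CNOT_matrix
-- ===== SOURCE A (Python) =====
-- def get_CNOT_matrix(input_pauli):
--     '''
--     Given `input_pauli` as the list of Pauli strings (output from get_pauli),
--     this function computes a matrix M where:
--         M[i][j] = the estimated number of CNOT gates needed to transform Pauli string i into string j.
--     '''
--     string_num = len(input_pauli)
--     string_len = len(input_pauli[0][0])
--     res = [[0 for i in range(string_num)] for i in range(string_num)]
--     for ii in range(string_num):
--         for jj in range(string_num):
--             count = 0
--             string_i = input_pauli[ii][0]
--             string_j = input_pauli[jj][0]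
--             for i in range(string_len):
--                 if string_i[i] != string_j[i]:
--                     count = count + 1
--                     if string_i[i] != 'I' and string_j[i] != 'I':
--                         count = count + 1
--             res[ii][jj] = count
--     return res
-- ===== SOURCE B (Python) =====
-- def get_CNOT_matrix(input_pauli):
--     '''
--     Set-based reformulation: per string precompute the set of (position, char)
--     pairs and the set of 'I' positions; each matrix entry is then a closed
--     formula in set intersection sizes:
--         M[i][j] = 2*L - 2*|S_i & S_j| - |I_i| - |I_j| + 2*|I_i & I_j|.
--     '''
--     L = len(input_pauli[0][0])
--     data = []
--     for p in input_pauli: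
--         s = p[0]
--         pairs = {(i, s[i]) for i in range(L)}
--         ipos = {i for i in range(L) if s[i] == 'I'}
--         data.append((pairs, ipos))
--     return [[2 * L - 2 * len(si & sj) - len(ii) - len(ij) + 2 * len(ii & ij)
--              for (sj, ij) in data]
--             for (si, ii) in data]
-- ===== Notes on version B (the rewrite author's own statement) =====
-- stated objective: alternative
-- what changed: B precomputes per string a set of (position,char) pairs and a set of 'I' positions, then fills each matrix entry with the closed formula 2*L - 2*|S_i&S_j| - |I_i| - |I_j| + 2*|I_i&I_j| instead of A's branchy per-position comparison loop per entry.
import Mathlib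
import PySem

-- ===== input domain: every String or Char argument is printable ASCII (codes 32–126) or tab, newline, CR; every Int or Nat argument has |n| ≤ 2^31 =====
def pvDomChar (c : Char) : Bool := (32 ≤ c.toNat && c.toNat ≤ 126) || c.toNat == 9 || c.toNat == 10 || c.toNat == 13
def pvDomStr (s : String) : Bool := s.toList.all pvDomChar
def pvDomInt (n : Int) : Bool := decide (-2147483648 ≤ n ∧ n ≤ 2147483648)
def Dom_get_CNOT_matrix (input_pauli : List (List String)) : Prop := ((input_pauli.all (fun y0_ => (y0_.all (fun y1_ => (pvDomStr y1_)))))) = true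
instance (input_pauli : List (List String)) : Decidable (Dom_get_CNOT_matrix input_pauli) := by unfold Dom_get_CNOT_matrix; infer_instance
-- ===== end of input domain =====

-- ===== PORT A =====
-- B replaces A's branchy per-position scan by per-string (position,char) / 'I'-position
-- sets and a closed formula in set-intersection sizes (objective: alternative).
-- A-side helper: the inner `for i in range(string_len)` counting loop of A, step for step.
-- String indexing s[i] with 0 ≤ i is exact via toList.getD; inside Pre_ every index is in
-- range, so the default ' ' is never read.
def pvCountA (si sj : List Char) (string_len : Nat) : Int :=
  (List.range string_len).foldl (fun count i =>
    if si.getD i ' ' ≠ sj.getD i ' ' then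
      if si.getD i ' ' ≠ 'I' ∧ sj.getD i ' ' ≠ 'I' then count + 1 + 1 else count + 1
    else count) 0

-- A builds res as an n x n zero matrix and assigns res[ii][jj] once per (ii,jj) in order:
-- ported as the same double loop over range(string_num) producing each entry in place.
-- input_pauli[ii][0] is exact via getD: inside Pre_ ii < length and the inner lists are
-- nonempty, so the defaults are never read.
def get_CNOT_matrix (input_pauli : List (List String)) : List (List Int) :=
  let string_num := input_pauli.length
  let string_len := ((input_pauli.getD 0 []).getD 0 "").toList.length
  (List.range string_num).map (fun ii =>
    (List.range string_num).map (fun jj =>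
      pvCountA ((input_pauli.getD ii []).getD 0 "").toList
               ((input_pauli.getD jj []).getD 0 "").toList string_len))

-- ===== PORT B =====
-- B-side helper: the per-string precomputation of Source B — the set of (position, char)
-- pairs and the set of 'I' positions (Python set comprehensions over range(L)).
def pvData (s : List Char) (L : Nat) : PySem.Set (Nat × Char) × PySem.Set Nat :=
  (PySem.Set.ofList ((List.range L).map (fun i => (i, s.getD i ' '))),
   PySem.Set.ofList ((List.range L).filter (fun i => s.getD i ' ' == 'I')))

def get_CNOT_matrix_alt (input_pauli : List (List String)) : List (List Int) :=
  let L := ((input_pauli.getD 0 []).getD 0 "").toList.length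
  let data := input_pauli.map (fun p => pvData (p.getD 0 "").toList L)
  data.map (fun di =>
    data.map (fun dj =>
      2 * (L : Int) - 2 * PySem.Set.len (PySem.Set.inter di.1 dj.1)
        - PySem.Set.len di.2 - PySem.Set.len dj.2
        + 2 * PySem.Set.len (PySem.Set.inter di.2 dj.2)))

-- ===== PRECONDITION & SPEC =====
-- Pre_ is exactly where Python A returns: A raises IndexError on an empty outer list
-- (input_pauli[0]), on an empty inner list (p[0]), and when some first string is shorter
-- than the first one (string_j[i] out of range).
def Pre_get_CNOT_matrix (input_pauli : List (List String)) : Prop :=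
  input_pauli ≠ [] ∧ ∀ p ∈ input_pauli, p ≠ [] ∧
    ((input_pauli.getD 0 []).getD 0 "").toList.length ≤ ((p.getD 0 "").toList.length)
instance (input_pauli : List (List String)) : Decidable (Pre_get_CNOT_matrix input_pauli) := by
  unfold Pre_get_CNOT_matrix; infer_instance

def pvWitness_get_CNOT_matrix : List (List String) := [["XI"], ["IZ"]]

def Spec_get_CNOT_matrix (input_pauli : List (List String)) (out : List (List Int)) : Prop := out = get_CNOT_matrix_alt input_pauli
instance (input_pauli : List (List String)) (out : List (List Int)) : Decidable (Spec_get_CNOT_matrix input_pauli out) := by unfold Spec_get_CNOT_matrix; infer_instance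

-- ===== CLAIM (what is proved, stated in full; the proofs are below) =====
def Claim_equal_get_CNOT_matrix : Prop := ∀ (input_pauli : List (List String)), Dom_get_CNOT_matrix input_pauli → Pre_get_CNOT_matrix input_pauli → Spec_get_CNOT_matrix input_pauli (get_CNOT_matrix input_pauli)

-- ===== LEMMAS AND PROOFS =====

-- Per-position counting predicates, as Bool, over the first L positions.
def pvEq (si sj : List Char) (i : Nat) : Bool := si.getD i ' ' == sj.getD i ' '
def pvI (s : List Char) (i : Nat) : Bool := s.getD i ' ' == 'I'

-- A's inner loop in closed form: the count over range L expressed through the four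
-- per-position tallies.
theorem pvCountA_closed (si sj : List Char) (L : Nat) :
    pvCountA si sj L =
      2 * (L : Int) - 2 * ((List.range L).countP (pvEq si sj) : Int)
        - ((List.range L).countP (pvI si) : Int) - ((List.range L).countP (pvI sj) : Int)
        + 2 * ((List.range L).countP (fun i => pvI si i && pvI sj i) : Int) := by
  induction L with
  | zero => simp [pvCountA]
  | succ n ih =>
    have hfold : pvCountA si sj (n + 1) =
        (if si.getD n ' ' ≠ sj.getD n ' ' then
          if si.getD n ' ' ≠ 'I' ∧ sj.getD n ' ' ≠ 'I' then pvCountA si sj n + 1 + 1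
          else pvCountA si sj n + 1
        else pvCountA si sj n) := by
      simp only [pvCountA, List.range_succ, List.foldl_append, List.foldl_cons, List.foldl_nil]
    rw [hfold, ih]
    have e1 : pvEq si sj n = decide (si.getD n ' ' = sj.getD n ' ') := Bool.beq_eq_decide_eq _ _
    have e2 : pvI si n = decide (si.getD n ' ' = 'I') := Bool.beq_eq_decide_eq _ _
    have e3 : pvI sj n = decide (sj.getD n ' ' = 'I') := Bool.beq_eq_decide_eq _ _
    simp only [List.range_succ, List.countP_append, List.countP_cons, List.countP_nil,
      Nat.zero_add, Nat.add_zero, e1, e2, e3]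
    by_cases hab : si.getD n ' ' = sj.getD n ' '
    case pos =>
      by_cases ha : si.getD n ' ' = 'I'
      case pos =>
        have hb : sj.getD n ' ' = 'I' := hab ▸ ha
        simp only [hab, ha, hb, decide_true, decide_false, Bool.and_true,
            Bool.and_false, Bool.true_and, Bool.false_and, if_true, if_false,
            decide_eq_true_eq, ite_true, ite_false, not_true, not_false_iff, ne_eq,
            and_self, and_true, true_and, and_false, false_and,
            decide_eq_false_iff_not, if_neg, if_pos, Nat.add_zero, eq_comm, Bool.false_eq_true, Bool.true_eq_false]
        push_cast; ring
      case neg =>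
        have hb : ¬ sj.getD n ' ' = 'I' := fun h => ha (hab.trans h)
        have ha' : ¬ 'I' = si.getD n ' ' := fun h => ha h.symm
        have hb' : ¬ 'I' = sj.getD n ' ' := fun h => hb h.symm
        simp only [hab, ha, hb, ha', hb', decide_true, decide_false, Bool.and_true,
            Bool.and_false, Bool.true_and, Bool.false_and, if_true, if_false,
            decide_eq_true_eq, ite_true, ite_false, not_true, not_false_iff, ne_eq,
            and_self, and_true, true_and, and_false, false_and,
            decide_eq_false_iff_not, if_neg, if_pos, Nat.add_zero, eq_comm, Bool.false_eq_true, Bool.true_eq_false]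
        push_cast; ring
    case neg =>
      by_cases ha : si.getD n ' ' = 'I'
      case pos =>
        have hb : ¬ sj.getD n ' ' = 'I' := fun h => hab (ha.trans h.symm)
        have hb' : ¬ 'I' = sj.getD n ' ' := fun h => hb h.symm
        simp only [hab, ha, hb, hb', decide_true, decide_false, Bool.and_true,
            Bool.and_false, Bool.true_and, Bool.false_and, if_true, if_false,
            decide_eq_true_eq, ite_true, ite_false, not_true, not_false_iff, ne_eq,
            and_self, and_true, true_and, and_false, false_and,
            decide_eq_false_iff_not, if_neg, if_pos, Nat.add_zero, eq_comm, Bool.false_eq_true, Bool.true_eq_false]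
        push_cast; ring
      case neg =>
        by_cases hb : sj.getD n ' ' = 'I'
        case pos =>
          have ha' : ¬ 'I' = si.getD n ' ' := fun h => ha h.symm
          simp only [hab, ha, hb, ha', decide_true, decide_false, Bool.and_true,
            Bool.and_false, Bool.true_and, Bool.false_and, if_true, if_false,
            decide_eq_true_eq, ite_true, ite_false, not_true, not_false_iff, ne_eq,
            and_self, and_true, true_and, and_false, false_and,
            decide_eq_false_iff_not, if_neg, if_pos, Nat.add_zero, eq_comm, Bool.false_eq_true, Bool.true_eq_false]
          push_cast; ring
        case neg =>
          have ha' : ¬ 'I' = si.getD n ' ' := fun h => ha h.symm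
          have hb' : ¬ 'I' = sj.getD n ' ' := fun h => hb h.symm
          simp only [hab, ha, hb, ha', hb', decide_true, decide_false, Bool.and_true,
            Bool.and_false, Bool.true_and, Bool.false_and, if_true, if_false,
            decide_eq_true_eq, ite_true, ite_false, not_true, not_false_iff, ne_eq,
            and_self, and_true, true_and, and_false, false_and,
            decide_eq_false_iff_not, if_neg, if_pos, Nat.add_zero, eq_comm, Bool.false_eq_true, Bool.true_eq_false]
          push_cast; ring

-- Membership in the (position, char) pair list of pvData.
theorem pv_mem_pairs (s : List Char) (L : Nat) (x : Nat × Char) :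
    x ∈ (List.range L).map (fun i => (i, s.getD i ' ')) ↔ x.1 < L ∧ x.2 = s.getD x.1 ' ' := by
  constructor
  · intro hx
    rcases List.mem_map.mp hx with ⟨i, hi, hxi⟩
    subst hxi; exact ⟨List.mem_range.mp hi, rfl⟩
  · rintro ⟨h1, h2⟩
    exact List.mem_map.mpr ⟨x.1, List.mem_range.mpr h1, by
      cases x; simp at h2 ⊢; exact h2.symm⟩

-- The pair list is duplicate-free, so PySem.Set.ofList keeps it as is.
theorem pv_pairs_nodup (s : List Char) (L : Nat) :
    ((List.range L).map (fun i => (i, s.getD i ' '))).Nodup :=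
  (List.nodup_range).map (fun a b h => congrArg Prod.fst h)

-- |S_i ∩ S_j| counts the positions where the two strings agree.
theorem pv_len_inter_pairs (si sj : List Char) (L : Nat) :
    (PySem.Set.inter (pvData si L).1 (pvData sj L).1).length =
      (List.range L).countP (pvEq si sj) := by
  unfold pvData
  dsimp only
  rw [PySem.Set.ofList_eq_self_of_nodup _ (pv_pairs_nodup si L),
      PySem.Set.ofList_eq_self_of_nodup _ (pv_pairs_nodup sj L)]
  show (((List.range L).map (fun i => (i, si.getD i ' '))).filter
      (fun x => PySem.Set.contains ((List.range L).map (fun i => (i, sj.getD i ' '))) x)).length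
      = _
  rw [List.filter_map, List.length_map, ← List.countP_eq_length_filter]
  apply List.countP_congr
  intro i hi
  have hiL := List.mem_range.mp hi
  simp only [Function.comp]
  constructor
  · intro h
    rcases (pv_mem_pairs sj L _).mp ((PySem.Set.contains_iff _ _).mp h) with ⟨_, h2⟩
    simp only [pvEq, beq_iff_eq]
    simpa using h2
  · intro h
    apply (PySem.Set.contains_iff _ _).mpr
    apply (pv_mem_pairs sj L _).mpr
    exact ⟨hiL, by simpa [pvEq] using h⟩

-- The 'I'-position list is duplicate-free too.
theorem pv_ipos_nodup (s : List Char) (L : Nat) :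
    ((List.range L).filter (fun i => s.getD i ' ' == 'I')).Nodup :=
  List.Nodup.filter _ List.nodup_range

-- |I| counts the 'I' positions.
theorem pv_len_ipos (s : List Char) (L : Nat) :
    ((pvData s L).2 : List Nat).length = (List.range L).countP (pvI s) := by
  unfold pvData
  dsimp only
  rw [PySem.Set.ofList_eq_self_of_nodup _ (pv_ipos_nodup s L), ← List.countP_eq_length_filter]
  rfl

-- |I_i ∩ I_j| counts positions where both strings are 'I'.
theorem pv_len_inter_ipos (si sj : List Char) (L : Nat) :
    (PySem.Set.inter (pvData si L).2 (pvData sj L).2).length =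
      (List.range L).countP (fun i => pvI si i && pvI sj i) := by
  unfold pvData
  dsimp only
  rw [PySem.Set.ofList_eq_self_of_nodup _ (pv_ipos_nodup si L),
      PySem.Set.ofList_eq_self_of_nodup _ (pv_ipos_nodup sj L)]
  show (((List.range L).filter (fun i => si.getD i ' ' == 'I')).filter
      (fun x => PySem.Set.contains ((List.range L).filter (fun i => sj.getD i ' ' == 'I')) x)).length
      = _
  rw [← List.countP_eq_length_filter, List.countP_filter]
  apply List.countP_congr
  intro i hi
  constructor
  · intro h
    have h1 := (Bool.and_eq_true _ _).mp h
    have h2 := List.of_mem_filter ((PySem.Set.contains_iff _ _).mp h1.1)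
    exact (Bool.and_eq_true _ _).mpr ⟨h1.2, h2⟩
  · intro h
    have h1 := (Bool.and_eq_true _ _).mp h
    exact (Bool.and_eq_true _ _).mpr
      ⟨(PySem.Set.contains_iff _ _).mpr (List.mem_filter.mpr ⟨hi, h1.2⟩), h1.1⟩

-- One matrix entry: A's counting loop equals B's set formula, for any two strings.
theorem pv_entry (si sj : List Char) (L : Nat) :
    pvCountA si sj L =
      2 * (L : Int) - 2 * PySem.Set.len (PySem.Set.inter (pvData si L).1 (pvData sj L).1)
        - PySem.Set.len (pvData si L).2 - PySem.Set.len (pvData sj L).2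
        + 2 * PySem.Set.len (PySem.Set.inter (pvData si L).2 (pvData sj L).2) := by
  simp only [PySem.Set.len, pv_len_inter_pairs, pv_len_ipos, pv_len_inter_ipos]
  exact pvCountA_closed si sj L

-- ===== VERDICT (by name: the statement is the Claim_ definition above) =====
theorem get_CNOT_matrix_spec : Claim_equal_get_CNOT_matrix := by
  intro input_pauli _ _
  show get_CNOT_matrix input_pauli = get_CNOT_matrix_alt input_pauli
  simp only [get_CNOT_matrix, get_CNOT_matrix_alt]
  apply List.ext_getElem
  · simp
  · intro ii h1 h2
    apply List.ext_getElem
    · simp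
    · intro jj h3 h4
      have hii : ii < input_pauli.length := by simpa using h2
      have hjj : jj < input_pauli.length := by simpa using h4
      simp only [List.getElem_map, List.getElem_range, List.getD_eq_getElem _ _ hii,
        List.getD_eq_getElem _ _ hjj]
      exact pv_entry _ _ _
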